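-- pv_equiv track=rewrite | github.com/Futrell/ssm | data/hungarian/code/extract_missing.py | extract_suffixes
-- ===== SOURCE A (Python) =====
-- def extract_suffixes(segment, initial_stem, suffixes, suffix_dict):
-- 	suffix_list, label_list = [], []
--
-- 	while segment:
-- 		matched_suffix, matched_label = None, None
-- 		for suffix in suffixes:
-- 			if segment.endswith(suffix):
-- 				matched_suffix = suffix
-- 				matched_label = suffix_dict.get(suffix, suffix)
-- 				break
--
-- 		if matched_suffix:
-- 			suffix_list.insert(0, matched_suffix)
-- 			label_list.insert(0, matched_label)
-- 			segment = segment[:-len(matched_suffix)]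
-- 		else:
-- 			# If the suffix isn't recognized, assume it's part of the stem
-- 			initial_stem += segment[0]
-- 			segment = segment[1:]
--
-- 	return suffix_list, label_list, initial_stem  # Return the updated stem as well
-- ===== SOURCE B (Python) =====
-- def extract_suffixes(segment, initial_stem, suffixes, suffix_dict):
--     # Work on the REVERSED segment with an index pointer and a precomputed table
--     # of (reversed suffix, suffix, label): matching is prefix-testing at offset i,
--     # no string slicing of the segment, no insert(0), no per-char rescans.
--     table = [(s[::-1], s, suffix_dict.get(s, s)) for s in suffixes]
--     rev = segment[::-1]
--     i = 0
--     sufs, labs = [], []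
--     while True:
--         hit = None
--         for rs, s, lab in table:
--             if rev.startswith(rs, i):
--                 hit = (rs, s, lab)
--                 break
--         if hit is None or not hit[0]:
--             break
--         sufs.append(hit[1])
--         labs.append(hit[2])
--         i += len(hit[0])
--     sufs.reverse()
--     labs.reverse()
--     return sufs, labs, initial_stem + rev[i:][::-1]
-- ===== Notes on version B (the rewrite author's own statement) =====
-- stated objective: faster
-- what changed: B reverses the segment once and walks an index pointer over it, matching against a precomputed table of (reversed suffix, suffix, label) by offset prefix tests, appending matches and reversing at the end; A repeatedly slices the segment, rescans the suffix list per stem character, looks the label up in the dict at each match and prepends with insert(0).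
import Mathlib
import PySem

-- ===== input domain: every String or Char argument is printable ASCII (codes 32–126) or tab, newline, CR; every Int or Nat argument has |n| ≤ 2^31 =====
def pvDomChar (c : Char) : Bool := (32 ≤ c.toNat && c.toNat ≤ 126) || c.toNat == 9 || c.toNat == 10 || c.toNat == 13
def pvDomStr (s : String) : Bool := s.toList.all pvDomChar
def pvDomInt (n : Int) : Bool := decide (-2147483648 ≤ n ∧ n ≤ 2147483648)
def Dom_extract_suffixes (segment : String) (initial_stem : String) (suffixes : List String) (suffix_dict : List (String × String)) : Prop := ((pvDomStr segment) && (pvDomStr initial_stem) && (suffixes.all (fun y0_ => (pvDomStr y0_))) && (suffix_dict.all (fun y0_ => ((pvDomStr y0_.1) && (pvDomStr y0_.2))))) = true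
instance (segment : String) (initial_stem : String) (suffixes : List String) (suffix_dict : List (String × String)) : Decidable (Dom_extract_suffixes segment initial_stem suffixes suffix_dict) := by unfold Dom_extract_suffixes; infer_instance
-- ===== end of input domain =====

-- B reverses the segment once and matches a precomputed (reversed-suffix, suffix,
-- label) table by prefix tests on the reversed tail, appending then reversing;
-- A slices the segment by endswith, prepends with insert(0) and drains the stem
-- one character (with a full suffix rescan) at a time.


-- ===== PORT A =====
-- A's while loop; state = (segment, suffix_list, label_list, initial_stem), on chars.
def pvALoop (suffixes : List String) (d : PySem.Dict String String) :
    List Char → List String → List String → List Char → List String × List String × List Char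
  | [], sl, ll, stem => (sl, ll, stem)
  | c :: rest, sl, ll, stem =>
    -- the for-loop with break = first suffix s with segment.endswith(s)
    match suffixes.find? (fun s => PySem.Chars.endswith (c :: rest) s.toList) with
    | some m =>
      if h : m.toList ≠ [] then  -- 'if matched_suffix:' (truthiness: non-empty string)
        pvALoop suffixes d (PySem.List.slice (c :: rest) none (some (-(m.toList.length : Int))))
          (m :: sl) (d.getD m m :: ll) stem
      else
        pvALoop suffixes d rest sl ll (stem ++ [c])
    | none => pvALoop suffixes d rest sl ll (stem ++ [c])
  termination_by seg _ _ _ => seg.length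
  decreasing_by
  all_goals first
    | (have hk : 0 < m.toList.length := by
        cases hml : m.toList with
        | nil => exact absurd hml h
        | cons a l => simp
       rw [PySem.List.slice_to_neg_natCast _ _ hk]
       simp only [List.length_take, List.length_cons]
       omega)
    | simp

def extract_suffixes (segment : String) (initial_stem : String) (suffixes : List String) (suffix_dict : List (String × String)) : List String × List String × String :=
  ((pvALoop suffixes (PySem.Dict.ofList suffix_dict) segment.toList [] [] initial_stem.toList).1,
   (pvALoop suffixes (PySem.Dict.ofList suffix_dict) segment.toList [] [] initial_stem.toList).2.1,
   String.ofList (pvALoop suffixes (PySem.Dict.ofList suffix_dict) segment.toList [] [] initial_stem.toList).2.2)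

-- ===== PORT B =====
-- the precomputed table [(s[::-1], s, suffix_dict.get(s, s)) for s in suffixes]
def pvBTable (suffix_dict : List (String × String)) (suffixes : List String) :
    List (List Char × String × String) :=
  suffixes.map (fun s => (s.toList.reverse, s, (PySem.Dict.ofList suffix_dict).getD s s))

-- B's while loop over the reversed segment: the index pointer i is represented by
-- the remaining tail rev (rev.drop, never a slice of the original segment);
-- matches are appended and reversed once by the wrapper.
def pvBLoop (table : List (List Char × String × String)) :
    List Char → List String → List String → List String × List String × List Char
  | rev, sufs, labs =>
    match hm : table.find? (fun e => e.1.isPrefixOf rev) with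
    | some hit =>
      if hne : hit.1 = [] then (sufs, labs, rev)
      else pvBLoop table (rev.drop hit.1.length) (sufs ++ [hit.2.1]) (labs ++ [hit.2.2])
    | none => (sufs, labs, rev)
  termination_by rev _ _ => rev.length
  decreasing_by
    have hp : hit.1.isPrefixOf rev = true := by
      have := List.find?_some hm; simpa using this
    have hle : hit.1.length ≤ rev.length :=
      (List.isPrefixOf_iff_prefix.mp hp).length_le
    have hk : 0 < hit.1.length := List.length_pos_iff.mpr hne
    simp only [List.length_drop]
    omega

def extract_suffixes_alt (segment : String) (initial_stem : String) (suffixes : List String) (suffix_dict : List (String × String)) : List String × List String × String :=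
  ((pvBLoop (pvBTable suffix_dict suffixes) segment.toList.reverse [] []).1.reverse,
   (pvBLoop (pvBTable suffix_dict suffixes) segment.toList.reverse [] []).2.1.reverse,
   String.ofList (initial_stem.toList ++
     (pvBLoop (pvBTable suffix_dict suffixes) segment.toList.reverse [] []).2.2.reverse))

-- ===== PRECONDITION & SPEC =====
def Spec_extract_suffixes (segment : String) (initial_stem : String) (suffixes : List String) (suffix_dict : List (String × String)) (out : List String × List String × String) : Prop := out = extract_suffixes_alt segment initial_stem suffixes suffix_dict
instance (segment : String) (initial_stem : String) (suffixes : List String) (suffix_dict : List (String × String)) (out : List String × List String × String) : Decidable (Spec_extract_suffixes segment initial_stem suffixes suffix_dict out) := by unfold Spec_extract_suffixes; infer_instance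

-- ===== CLAIM =====
def Claim_equal_extract_suffixes : Prop := ∀ (segment : String) (initial_stem : String) (suffixes : List String) (suffix_dict : List (String × String)), Dom_extract_suffixes segment initial_stem suffixes suffix_dict → Spec_extract_suffixes segment initial_stem suffixes suffix_dict (extract_suffixes segment initial_stem suffixes suffix_dict)

-- ===== LEMMAS AND PROOFS =====

-- one-step unfoldings with plain (non-dependent) matches
lemma pvALoop_nil (suffixes : List String) (d : PySem.Dict String String)
    (sl ll : List String) (stem : List Char) :
    pvALoop suffixes d [] sl ll stem = (sl, ll, stem) := by
  rw [pvALoop.eq_def]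

lemma pvALoop_cons (suffixes : List String) (d : PySem.Dict String String)
    (c : Char) (rest : List Char) (sl ll : List String) (stem : List Char) :
    pvALoop suffixes d (c :: rest) sl ll stem =
      (match suffixes.find? (fun s => PySem.Chars.endswith (c :: rest) s.toList) with
       | some m =>
         if m.toList ≠ [] then
           pvALoop suffixes d (PySem.List.slice (c :: rest) none (some (-(m.toList.length : Int))))
             (m :: sl) (d.getD m m :: ll) stem
         else pvALoop suffixes d rest sl ll (stem ++ [c])
       | none => pvALoop suffixes d rest sl ll (stem ++ [c])) := by
  rw [pvALoop.eq_def]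
  dsimp only
  cases hm : suffixes.find? (fun s => PySem.Chars.endswith (c :: rest) s.toList) with
  | none => rfl
  | some m => by_cases h : m.toList ≠ [] <;> simp [h]

lemma pvBLoop_eq (table : List (List Char × String × String))
    (rev : List Char) (sufs labs : List String) :
    pvBLoop table rev sufs labs =
      (match table.find? (fun e => e.1.isPrefixOf rev) with
       | some hit =>
         if hit.1 = [] then (sufs, labs, rev)
         else pvBLoop table (rev.drop hit.1.length) (sufs ++ [hit.2.1]) (labs ++ [hit.2.2])
       | none => (sufs, labs, rev)) := by
  rw [pvBLoop]
  cases hm : table.find? (fun e => e.1.isPrefixOf rev) with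
  | none => rfl
  | some hit => by_cases h : hit.1 = [] <;> simp [h]

-- the table's prefix test on the reversed segment is A's endswith on the segment
lemma pvFind_table (suffix_dict : List (String × String)) (suffixes : List String)
    (seg : List Char) :
    (pvBTable suffix_dict suffixes).find? (fun e => e.1.isPrefixOf seg.reverse) =
      (suffixes.find? (fun s => PySem.Chars.endswith seg s.toList)).map
        (fun s => (s.toList.reverse, s, (PySem.Dict.ofList suffix_dict).getD s s)) := by
  induction suffixes with
  | nil => rfl
  | cons s sfs ih =>
    have hpred : (s.toList.reverse.isPrefixOf seg.reverse) =
        PySem.Chars.endswith seg s.toList := by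
      by_cases h : s.toList <:+ seg
      · rw [List.isPrefixOf_iff_prefix.mpr (List.reverse_prefix.mpr h),
            (PySem.Chars.endswith_iff _ _).mpr h]
      · have h1 : s.toList.reverse.isPrefixOf seg.reverse = false := by
          by_contra hc
          exact h (List.reverse_prefix.mp (List.isPrefixOf_iff_prefix.mp
            (by simpa using hc)))
        have h2 : PySem.Chars.endswith seg s.toList = false := by
          by_contra hc
          exact h ((PySem.Chars.endswith_iff _ _).mp (by simpa using hc))
        rw [h1, h2]
    simp only [pvBTable, List.map_cons, List.find?_cons]
    rw [hpred]
    cases hb : PySem.Chars.endswith seg s.toList with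
    | true => simp
    | false => simpa [pvBTable] using ih

-- 'no usable match' (A's else-branch): find? yields nothing, or the empty suffix.
def pvNoMatch (suffixes : List String) (seg : List Char) : Prop :=
  ∀ m, suffixes.find? (fun s => PySem.Chars.endswith seg s.toList) = some m → m.toList = []

lemma pvALoop_step (suffixes : List String) (d : PySem.Dict String String)
    (c : Char) (rest : List Char) (sl ll : List String) (stem : List Char) (m : String)
    (hm : suffixes.find? (fun s => PySem.Chars.endswith (c :: rest) s.toList) = some m)
    (h : m.toList ≠ []) :
    pvALoop suffixes d (c :: rest) sl ll stem =
      pvALoop suffixes d (PySem.List.slice (c :: rest) none (some (-(m.toList.length : Int))))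
        (m :: sl) (d.getD m m :: ll) stem := by
  rw [pvALoop_cons, hm]; simp [h]

lemma pvALoop_else (suffixes : List String) (d : PySem.Dict String String)
    (c : Char) (rest : List Char) (sl ll : List String) (stem : List Char)
    (hnm : pvNoMatch suffixes (c :: rest)) :
    pvALoop suffixes d (c :: rest) sl ll stem = pvALoop suffixes d rest sl ll (stem ++ [c]) := by
  rw [pvALoop_cons]
  cases hm : suffixes.find? (fun s => PySem.Chars.endswith (c :: rest) s.toList) with
  | none => rfl
  | some m => simp [hnm m hm]

-- pvBLoop against A's find?, via pvFind_table, on rev = seg.reverse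
lemma pvBLoop_step (suffix_dict : List (String × String)) (suffixes : List String)
    (seg : List Char) (sufs labs : List String) (m : String)
    (hm : suffixes.find? (fun s => PySem.Chars.endswith seg s.toList) = some m)
    (h : m.toList ≠ []) :
    pvBLoop (pvBTable suffix_dict suffixes) seg.reverse sufs labs =
      pvBLoop (pvBTable suffix_dict suffixes) (seg.reverse.drop m.toList.length)
        (sufs ++ [m]) (labs ++ [(PySem.Dict.ofList suffix_dict).getD m m]) := by
  rw [pvBLoop_eq, pvFind_table, hm]
  simp [h]

lemma pvBLoop_stop (suffix_dict : List (String × String)) (suffixes : List String)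
    (seg : List Char) (sufs labs : List String) (hnm : pvNoMatch suffixes seg) :
    pvBLoop (pvBTable suffix_dict suffixes) seg.reverse sufs labs = (sufs, labs, seg.reverse) := by
  rw [pvBLoop_eq, pvFind_table]
  cases hm : suffixes.find? (fun s => PySem.Chars.endswith seg s.toList) with
  | none => rfl
  | some m => simp [hnm m hm]

-- a matched suffix fits inside the segment
lemma pvMatchLen (suffixes : List String) (seg : List Char) (m : String)
    (hm : suffixes.find? (fun s => PySem.Chars.endswith seg s.toList) = some m) :
    m.toList.length ≤ seg.length := by
  have hs : PySem.Chars.endswith seg m.toList = true := by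
    have := List.find?_some hm; simpa using this
  exact ((PySem.Chars.endswith_iff _ _).mp hs).length_le

-- A's strip segment[:-k], reversed, is B's drop k on the reversed segment
lemma pvSliceRev (seg : List Char) (k : Nat) (hk : 0 < k) :
    (PySem.List.slice seg none (some (-(k : Int)))).reverse = seg.reverse.drop k := by
  rw [PySem.List.slice_to_neg_natCast _ _ hk, List.drop_reverse]

lemma pvSliceLen (seg : List Char) (k : Nat) (hk : 0 < k) :
    (PySem.List.slice seg none (some (-(k : Int)))).length = seg.length - k := by
  rw [PySem.List.slice_to_neg_natCast _ _ hk]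
  simp only [List.length_take]
  omega

-- stability: dropping the first character cannot create a new usable match.
lemma pvNoMatch_tail (suffixes : List String) (c : Char) (rest : List Char)
    (h : pvNoMatch suffixes (c :: rest)) : pvNoMatch suffixes rest := by
  induction suffixes with
  | nil => intro m hm; simp at hm
  | cons s sfs ih =>
    intro m hm
    cases hb : PySem.Chars.endswith (c :: rest) s.toList with
    | true =>
      have hs0 : s.toList = [] := h s (by simp [hb])
      have hbr : PySem.Chars.endswith rest s.toList = true := by
        rw [PySem.Chars.endswith_iff]; simp [hs0]
      rw [List.find?_cons] at hm
      simp only [hbr] at hm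
      cases hm; exact hs0
    | false =>
      have hbr : PySem.Chars.endswith rest s.toList = false := by
        cases hr : PySem.Chars.endswith rest s.toList with
        | false => rfl
        | true =>
          exact absurd ((PySem.Chars.endswith_iff _ _).mpr
            ((PySem.Chars.endswith_iff _ _).mp hr |>.trans (List.suffix_cons c rest)))
            (by simp [hb])
      have h' : pvNoMatch sfs (c :: rest) := by
        intro m' hm'
        exact h m' (by simp [hb, hm'])
      rw [List.find?_cons] at hm
      simp only [hbr] at hm
      exact ih h' m hm

lemma pvNoMatch_nil (suffixes : List String) : pvNoMatch suffixes ([] : List Char) := by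
  intro m hm
  have := pvMatchLen suffixes [] m hm
  simpa using this

-- A drains the whole segment into the stem once no usable match exists.
lemma pvALoop_drain (suffixes : List String) (d : PySem.Dict String String) :
    ∀ (seg : List Char) (sl ll : List String) (stem : List Char), pvNoMatch suffixes seg →
      pvALoop suffixes d seg sl ll stem = (sl, ll, stem ++ seg) := by
  intro seg
  induction seg with
  | nil => intro sl ll stem _; rw [pvALoop_nil]; simp
  | cons c rest ih =>
    intro sl ll stem h
    rw [pvALoop_else suffixes d c rest sl ll stem h]
    rw [ih sl ll (stem ++ [c]) (pvNoMatch_tail suffixes c rest h)]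
    simp

-- B's accumulators only collect (fuel = reversed-segment length).
lemma pvBLoop_acc_fuel (suffix_dict : List (String × String)) (suffixes : List String) :
    ∀ (n : Nat) (seg : List Char), seg.length ≤ n → ∀ (a1 a2 : List String),
      pvBLoop (pvBTable suffix_dict suffixes) seg.reverse a1 a2 =
        (a1 ++ (pvBLoop (pvBTable suffix_dict suffixes) seg.reverse [] []).1,
         a2 ++ (pvBLoop (pvBTable suffix_dict suffixes) seg.reverse [] []).2.1,
         (pvBLoop (pvBTable suffix_dict suffixes) seg.reverse [] []).2.2) := by
  intro n
  induction n with
  | zero =>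
    intro seg hlen a1 a2
    have hseg : seg = [] := List.length_eq_zero_iff.mp (Nat.le_zero.mp hlen)
    subst hseg
    rw [pvBLoop_stop suffix_dict suffixes [] a1 a2 (pvNoMatch_nil suffixes),
        pvBLoop_stop suffix_dict suffixes [] [] [] (pvNoMatch_nil suffixes)]
    simp
  | succ n ih =>
    intro seg hlen a1 a2
    cases hm : suffixes.find? (fun s => PySem.Chars.endswith seg s.toList) with
    | none =>
      have hnm : pvNoMatch suffixes seg := by intro m' hm'; rw [hm] at hm'; cases hm'
      rw [pvBLoop_stop suffix_dict suffixes seg a1 a2 hnm,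
          pvBLoop_stop suffix_dict suffixes seg [] [] hnm]
      simp
    | some m =>
      by_cases h : m.toList ≠ []
      · have hk : 0 < m.toList.length := List.length_pos_iff.mpr h
        have hle := pvMatchLen suffixes seg m hm
        have hdrop : seg.reverse.drop m.toList.length =
            (PySem.List.slice seg none (some (-(m.toList.length : Int)))).reverse :=
          (pvSliceRev seg m.toList.length hk).symm
        have hlen' : (PySem.List.slice seg none (some (-(m.toList.length : Int)))).length ≤ n := by
          rw [pvSliceLen seg m.toList.length hk]; omega
        rw [pvBLoop_step suffix_dict suffixes seg a1 a2 m hm h,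
            pvBLoop_step suffix_dict suffixes seg [] [] m hm h,
            hdrop,
            ih _ hlen' (a1 ++ [m]) (a2 ++ [(PySem.Dict.ofList suffix_dict).getD m m]),
            ih _ hlen' ([] ++ [m]) ([] ++ [(PySem.Dict.ofList suffix_dict).getD m m])]
        simp
      · have hnm : pvNoMatch suffixes seg := by
          intro m' hm'; rw [hm] at hm'; cases hm'
          simpa using h
        rw [pvBLoop_stop suffix_dict suffixes seg a1 a2 hnm,
            pvBLoop_stop suffix_dict suffixes seg [] [] hnm]
        simp

-- Main correspondence between A's loop and B's loop (fuel = segment length).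
lemma pvALoop_eq_pvBLoop_fuel (suffix_dict : List (String × String)) (suffixes : List String) :
    ∀ (n : Nat) (seg : List Char), seg.length ≤ n → ∀ (sl ll : List String) (stem : List Char),
      pvALoop suffixes (PySem.Dict.ofList suffix_dict) seg sl ll stem =
        ((pvBLoop (pvBTable suffix_dict suffixes) seg.reverse [] []).1.reverse ++ sl,
         (pvBLoop (pvBTable suffix_dict suffixes) seg.reverse [] []).2.1.reverse ++ ll,
         stem ++ (pvBLoop (pvBTable suffix_dict suffixes) seg.reverse [] []).2.2.reverse) := by
  intro n
  induction n with
  | zero =>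
    intro seg hlen sl ll stem
    have hseg : seg = [] := List.length_eq_zero_iff.mp (Nat.le_zero.mp hlen)
    subst hseg
    rw [pvALoop_nil, pvBLoop_stop suffix_dict suffixes [] [] [] (pvNoMatch_nil suffixes)]
    simp
  | succ n ih =>
    intro seg hlen sl ll stem
    cases hm : suffixes.find? (fun s => PySem.Chars.endswith seg s.toList) with
    | none =>
      have hnm : pvNoMatch suffixes seg := by intro m' hm'; rw [hm] at hm'; cases hm'
      rw [pvALoop_drain suffixes _ seg sl ll stem hnm,
          pvBLoop_stop suffix_dict suffixes seg [] [] hnm]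
      simp
    | some m =>
      by_cases h : m.toList ≠ []
      · cases seg with
        | nil => exact absurd (pvNoMatch_nil suffixes m hm) h
        | cons c rest =>
          have hk : 0 < m.toList.length := List.length_pos_iff.mpr h
          have hlen' :
              (PySem.List.slice (c :: rest) none (some (-(m.toList.length : Int)))).length ≤ n := by
            rw [pvSliceLen _ m.toList.length hk]
            simp only [List.length_cons]
            simp only [List.length_cons] at hlen
            omega
          rw [pvALoop_step suffixes _ c rest sl ll stem m hm h]
          rw [ih _ hlen' (m :: sl) ((PySem.Dict.ofList suffix_dict).getD m m :: ll) stem]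
          rw [pvBLoop_step suffix_dict suffixes (c :: rest) [] [] m hm h,
              (pvSliceRev (c :: rest) m.toList.length hk).symm,
              pvBLoop_acc_fuel suffix_dict suffixes n _ hlen'
                ([] ++ [m]) ([] ++ [(PySem.Dict.ofList suffix_dict).getD m m])]
          simp
      · have hnm : pvNoMatch suffixes seg := by
          intro m' hm'; rw [hm] at hm'; cases hm'
          simpa using h
        rw [pvALoop_drain suffixes _ seg sl ll stem hnm,
            pvBLoop_stop suffix_dict suffixes seg [] [] hnm]
        simp

-- ===== VERDICT =====
theorem extract_suffixes_spec : Claim_equal_extract_suffixes := by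
  intro segment initial_stem suffixes suffix_dict _
  unfold Spec_extract_suffixes extract_suffixes extract_suffixes_alt
  rw [pvALoop_eq_pvBLoop_fuel suffix_dict suffixes
      segment.toList.length segment.toList (Nat.le_refl _)]
  simp
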